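-- pv_equiv track=rewrite | github.com/0raN9ewww/XZ_Spider | src/parser.py | merge_codeblock_language_labels
-- ===== SOURCE A (Python) =====
-- def merge_codeblock_language_labels(lines):
--     merged = []
--     index = 0
--
--     while index < len(lines):
--         line = lines[index]
--         language = canonicalize_code_language(line)
--         if not language:
--             merged.append(line)
--             index += 1
--             continue
--
--         next_index = index + 1
--         while next_index < len(lines) and not lines[next_index].strip():
--             next_index += 1
--
--         if next_index < len(lines) and lines[next_index].strip() == "```":
--             merged.append(f"```{language}")
--             index = next_index + 1
--             continue
--
--         merged.append(line)
--         index += 1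
--
--     return merged
--
-- def canonicalize_code_language(line):
--     normalized = (line or "").strip().replace("复制代码", "").strip().lower()
--     language_map = {
--         "python": "python",
--         "py": "python",
--         "plain text": "text",
--         "plaintext": "text",
--         "text": "text",
--         "bash": "bash",
--         "shell": "bash",
--         "sh": "bash",
--         "javascript": "javascript",
--         "js": "javascript",
--         "java": "java",
--         "c": "c",
--         "c++": "cpp",
--         "cpp": "cpp",
--         "go": "go",
--         "php": "php",
--         "ruby": "ruby",
--         "rust": "rust",
--         "sql": "sql",
--         "html": "html",
--         "xml": "xml",
--         "json": "json",
--         "yaml": "yaml",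
--         "toml": "toml",
--         "sage": "python",
--     }
--     return language_map.get(normalized)
-- ===== SOURCE B (Python) =====
-- def canonicalize_code_language(line):
--     normalized = (line or "").strip().replace("复制代码", "").strip().lower()
--     language_map = {
--         "python": "python", "py": "python", "plain text": "text",
--         "plaintext": "text", "text": "text", "bash": "bash", "shell": "bash",
--         "sh": "bash", "javascript": "javascript", "js": "javascript",
--         "java": "java", "c": "c", "c++": "cpp", "cpp": "cpp", "go": "go",
--         "php": "php", "ruby": "ruby", "rust": "rust", "sql": "sql",
--         "html": "html", "xml": "xml", "json": "json", "yaml": "yaml",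
--         "toml": "toml", "sage": "python",
--     }
--     return language_map.get(normalized)
--
--
-- def merge_codeblock_language_labels(lines):
--     # Single forward pass with a pending-label state machine: no lookahead,
--     # no inner blank-scanning loop.
--     out = []
--     pending = None  # (original label line, canonical language, collected blank lines)
--     for line in lines:
--         if pending is not None:
--             orig, lang, blanks = pending
--             stripped = line.strip()
--             if not stripped:
--                 blanks.append(line)
--                 continue
--             pending = None
--             if stripped == "```":
--                 out.append(f"```{lang}")
--                 continue
--             out.append(orig)
--             out.extend(blanks)
--         language = canonicalize_code_language(line)
--         if language:
--             pending = (line, language, [])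
--         else:
--             out.append(line)
--     if pending is not None:
--         orig, _, blanks = pending
--         out.append(orig)
--         out.extend(blanks)
--     return out
-- ===== Notes on version B (the rewrite author's own statement) =====
-- stated objective: alternative
-- what changed: Replaces A's index-based while loop with an inner blank-scanning lookahead loop by a single forward pass over the lines carrying a pending-label state (label line, language, collected blanks), resolved when the next non-blank line arrives or at end of input.
import Mathlib
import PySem

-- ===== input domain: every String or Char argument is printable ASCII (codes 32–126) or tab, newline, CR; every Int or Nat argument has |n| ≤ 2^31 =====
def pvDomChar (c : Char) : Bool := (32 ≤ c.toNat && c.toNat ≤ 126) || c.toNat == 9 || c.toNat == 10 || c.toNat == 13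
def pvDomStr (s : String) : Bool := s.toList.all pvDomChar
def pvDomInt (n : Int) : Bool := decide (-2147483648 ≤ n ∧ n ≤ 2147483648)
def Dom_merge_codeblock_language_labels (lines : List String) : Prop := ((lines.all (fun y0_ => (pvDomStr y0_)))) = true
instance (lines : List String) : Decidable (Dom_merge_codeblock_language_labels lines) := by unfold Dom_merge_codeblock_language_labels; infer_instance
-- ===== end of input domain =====

-- B replaces A's index loop with its inner blank-skipping lookahead loop by one
-- forward pass carrying a pending-label state; same return value (objective: alternative).

-- ===== PORT A =====
def pvLanguageMap : PySem.Dict String String := PySem.Dict.ofList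
  [("python", "python"), ("py", "python"), ("plain text", "text"),
   ("plaintext", "text"), ("text", "text"), ("bash", "bash"), ("shell", "bash"),
   ("sh", "bash"), ("javascript", "javascript"), ("js", "javascript"),
   ("java", "java"), ("c", "c"), ("c++", "cpp"), ("cpp", "cpp"), ("go", "go"),
   ("php", "php"), ("ruby", "ruby"), ("rust", "rust"), ("sql", "sql"),
   ("html", "html"), ("xml", "xml"), ("json", "json"), ("yaml", "yaml"),
   ("toml", "toml"), ("sage", "python")]

-- helper used by both the A and the B source ('(line or "")' is the identity on strings,
-- ported literally as the if below)
def canonicalize_code_language (line : String) : Option String :=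
  let normalized := PySem.Str.lower (PySem.Str.strip
    (PySem.Str.replace (PySem.Str.strip (if line = "" then "" else line)) "复制代码" ""))
  pvLanguageMap.get? normalized

-- A's inner loop 'while next_index < len(lines) and not lines[next_index].strip()',
-- phrased on the suffix starting at index + 1
def skipBlanksA : List String → List String
  | [] => []
  | x :: xs => if PySem.Str.strip x = "" then skipBlanksA xs else x :: xs

theorem skipBlanksA_length_le : ∀ xs : List String, (skipBlanksA xs).length ≤ xs.length
  | [] => le_refl _
  | x :: xs => by
      simp only [skipBlanksA]
      split
      · exact le_trans (skipBlanksA_length_le xs) (Nat.le_succ _)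
      · exact le_refl _

-- A's outer while loop, phrased on the suffix of lines starting at index
-- ('if not language' is 'language = none'; lines[next_index] is the headI of the
-- skipped suffix); the canonicalizer is a parameter only to keep elaboration light
def mergeAGen (canon : String → Option String) : List String → List String
  | [] => []
  | line :: rest =>
    let language := canon line
    if language = none then line :: mergeAGen canon rest
    else if h : skipBlanksA rest ≠ [] ∧ PySem.Str.strip ((skipBlanksA rest).headI) = "```" then
      ("```" ++ language.getD "") :: mergeAGen canon ((skipBlanksA rest).tail)
    else
      line :: mergeAGen canon rest
termination_by ls => ls.length
decreasing_by
  · simp only [List.length_cons]; omega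
  · have h1 := skipBlanksA_length_le rest
    have h4 : 0 < (skipBlanksA rest).length := List.length_pos_of_ne_nil h.1
    have h2 : (skipBlanksA rest).tail.length = (skipBlanksA rest).length - 1 := List.length_tail
    simp only [List.length_cons]; omega
  · simp only [List.length_cons]; omega

def merge_codeblock_language_labels (lines : List String) : List String :=
  mergeAGen canonicalize_code_language lines

-- ===== PORT B =====
-- B: one forward pass; 'pending' = (original label line, language, blanks collected
-- since); the canonicalizer is a parameter only to keep elaboration light
def freshBGen (canon : String → Option String) (out : List String) (line : String) :
    List String × Option (String × String × List String) :=
  match canon line with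
  | some l => (out, some (line, l, []))
  | none => (out ++ [line], none)

def stepBGen (canon : String → Option String)
    (st : List String × Option (String × String × List String)) (line : String) :
    List String × Option (String × String × List String) :=
  match st with
  | (out, some (orig, lang, blanks)) =>
    if PySem.Str.strip line = "" then (out, some (orig, lang, blanks ++ [line]))
    else if PySem.Str.strip line = "```" then (out ++ ["```" ++ lang], none)
    else freshBGen canon (out ++ [orig] ++ blanks) line
  | (out, none) => freshBGen canon out line

def merge_codeblock_language_labels_alt (lines : List String) : List String :=
  match lines.foldl (stepBGen canonicalize_code_language) ([], none) with
  | (out, some (orig, _, blanks)) => out ++ [orig] ++ blanks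
  | (out, none) => out

-- ===== PRECONDITION & SPEC =====
def Spec_merge_codeblock_language_labels (lines : List String) (out : List String) : Prop := out = merge_codeblock_language_labels_alt lines
instance (lines : List String) (out : List String) : Decidable (Spec_merge_codeblock_language_labels lines out) := by unfold Spec_merge_codeblock_language_labels; infer_instance

-- ===== CLAIM (what is proved, stated in full; the proofs are below) =====
def Claim_equal_merge_codeblock_language_labels : Prop := ∀ (lines : List String), Dom_merge_codeblock_language_labels lines → Spec_merge_codeblock_language_labels lines (merge_codeblock_language_labels lines)

-- ===== LEMMAS AND PROOFS =====

def finishB (st : List String × Option (String × String × List String)) : List String :=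
  match st with
  | (out, some (orig, _, blanks)) => out ++ [orig] ++ blanks
  | (out, none) => out

theorem alt_eq_finishB (lines : List String) :
    merge_codeblock_language_labels_alt lines =
      finishB (lines.foldl (stepBGen canonicalize_code_language) ([], none)) := by
  unfold merge_codeblock_language_labels_alt finishB
  rcases lines.foldl (stepBGen canonicalize_code_language) ([], none) with
    ⟨out, _ | ⟨orig, lang, blanks⟩⟩ <;> rfl

theorem mergeA_nil (canon : String → Option String) : mergeAGen canon [] = [] := by
  rw [mergeAGen]

theorem mergeA_nolabel (canon : String → Option String) (line : String) (rest : List String)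
    (hc : canon line = none) :
    mergeAGen canon (line :: rest) = line :: mergeAGen canon rest := by
  rw [mergeAGen]
  simp [hc]

theorem mergeA_label (canon : String → Option String) (line lang : String) (rest : List String)
    (hc : canon line = some lang) :
    mergeAGen canon (line :: rest) =
      if skipBlanksA rest ≠ [] ∧ PySem.Str.strip ((skipBlanksA rest).headI) = "```" then
        ("```" ++ lang) :: mergeAGen canon ((skipBlanksA rest).tail)
      else
        line :: mergeAGen canon rest := by
  rw [mergeAGen]
  simp only [hc, Option.getD_some, reduceCtorEq, if_false]
  split <;> rfl

theorem canon_blank (b : String) (h : PySem.Str.strip b = "") :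
    canonicalize_code_language b = none := by
  unfold canonicalize_code_language
  have h2 : PySem.Str.strip (if b = "" then "" else b) = "" := by
    split
    · rfl
    · exact h
  rw [h2]
  rfl

theorem skipBlanksA_blanks (blanks xs : List String)
    (hb : ∀ b ∈ blanks, PySem.Str.strip b = "") :
    skipBlanksA (blanks ++ xs) = skipBlanksA xs := by
  induction blanks with
  | nil => rfl
  | cons b bs ih =>
    simp only [List.cons_append, skipBlanksA, hb b (by simp), if_true]
    exact ih (fun x hx => hb x (by simp [hx]))

theorem mergeA_blanks (canon : String → Option String)
    (Hblank : ∀ b : String, PySem.Str.strip b = "" → canon b = none)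
    (blanks xs : List String) (hb : ∀ b ∈ blanks, PySem.Str.strip b = "") :
    mergeAGen canon (blanks ++ xs) = blanks ++ mergeAGen canon xs := by
  induction blanks with
  | nil => rfl
  | cons b bs ih =>
    rw [List.cons_append, mergeA_nolabel canon b _ (Hblank b (hb b (by simp)))]
    simp only [List.cons_append, List.cons.injEq, true_and]
    exact ih (fun x hx => hb x (by simp [hx]))

theorem skipBlanksA_nonblank (b : String) (xs : List String)
    (h : ¬ PySem.Str.strip b = "") : skipBlanksA (b :: xs) = b :: xs := by
  simp [skipBlanksA, h]

theorem main_inv (canon : String → Option String)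
    (Hblank : ∀ b : String, PySem.Str.strip b = "" → canon b = none) :
    ∀ (n : ℕ) (ls : List String), ls.length = n →
    (∀ out, finishB (ls.foldl (stepBGen canon) (out, none)) =
        out ++ mergeAGen canon ls) ∧
    (∀ out orig lang blanks, canon orig = some lang →
      (∀ b ∈ blanks, PySem.Str.strip b = "") →
      finishB (ls.foldl (stepBGen canon) (out, some (orig, lang, blanks))) =
        out ++ mergeAGen canon (orig :: (blanks ++ ls))) := by
  intro n
  induction n using Nat.strong_induction_on with
  | _ n IH =>
    intro ls hlen
    constructor
    · intro out
      cases ls with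
      | nil => simp [finishB, mergeA_nil]
      | cons l ls' =>
        cases hc : canon l with
        | none =>
          simp only [List.foldl_cons, stepBGen, freshBGen, hc]
          rw [(IH ls'.length (by simp [← hlen]) ls' rfl).1 (out ++ [l]),
              mergeA_nolabel canon l ls' hc]
          simp
        | some lang =>
          simp only [List.foldl_cons, stepBGen, freshBGen, hc]
          rw [(IH ls'.length (by simp [← hlen]) ls' rfl).2 out l lang [] hc (by simp)]
          simp
    · intro out orig lang blanks hc hb
      cases ls with
      | nil =>
        have hsk : skipBlanksA blanks = [] := by
          have := skipBlanksA_blanks blanks [] hb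
          simpa using this
        have hmb : mergeAGen canon blanks = blanks := by
          have := mergeA_blanks canon Hblank blanks [] hb
          simpa [mergeA_nil] using this
        simp only [List.append_nil, List.foldl_nil, finishB]
        rw [mergeA_label canon orig lang blanks hc, if_neg (by simp [hsk]), hmb]
        simp
      | cons b ls' =>
        by_cases hblank : PySem.Str.strip b = ""
        · -- b is blank: B collects it into the pending blanks
          simp only [List.foldl_cons, stepBGen, if_pos hblank]
          rw [(IH ls'.length (by simp [← hlen]) ls' rfl).2 out orig lang (blanks ++ [b]) hc
              (by intro x hx
                  rcases List.mem_append.mp hx with h | h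
                  · exact hb x h
                  · simp only [List.mem_singleton] at h; subst h; exact hblank)]
          simp
        · have hsk : skipBlanksA (blanks ++ b :: ls') = b :: ls' := by
            rw [skipBlanksA_blanks blanks _ hb, skipBlanksA_nonblank b ls' hblank]
          by_cases hfence : PySem.Str.strip b = "```"
          · -- b closes the fence: both emit the merged "```<lang>" line
            simp only [List.foldl_cons, stepBGen, if_neg hblank, if_pos hfence]
            rw [(IH ls'.length (by simp [← hlen]) ls' rfl).1 (out ++ ["```" ++ lang]),
                mergeA_label canon orig lang (blanks ++ b :: ls') hc,
                if_pos (by rw [hsk]; exact ⟨by simp, by simpa using hfence⟩), hsk]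
            simp
          · -- b is an ordinary non-blank line: flush pending and process b afresh
            simp only [List.foldl_cons, stepBGen, if_neg hblank, if_neg hfence, freshBGen]
            rw [mergeA_label canon orig lang (blanks ++ b :: ls') hc,
                if_neg (by rw [hsk]; simp [hfence]),
                mergeA_blanks canon Hblank blanks (b :: ls') hb]
            cases hcb : canon b with
            | none =>
              rw [(IH ls'.length (by simp [← hlen]) ls' rfl).1
                    (out ++ [orig] ++ blanks ++ [b]),
                  mergeA_nolabel canon b ls' hcb]
              simp
            | some lang2 =>
              rw [(IH ls'.length (by simp [← hlen]) ls' rfl).2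
                    (out ++ [orig] ++ blanks) b lang2 [] hcb (by simp)]
              simp

-- ===== VERDICT (by name: the statement is the Claim_ definition above) =====
theorem merge_codeblock_language_labels_spec : Claim_equal_merge_codeblock_language_labels := by
  intro lines _
  unfold Spec_merge_codeblock_language_labels merge_codeblock_language_labels
  rw [alt_eq_finishB,
      (main_inv canonicalize_code_language canon_blank lines.length lines rfl).1 []]
  simp
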